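-- pv_equiv track=rewrite | github.com/popitsch/rnalib | pygenlib/utils.py | longest_hp_gc_len
-- ===== SOURCE A (Python) =====
-- from collections import Counter, abc
--
-- def longest_hp_gc_len(seq) -> (int, int):
--     """
--         Counts HP length (any allele) from start.
--         This method counts any character including N's
--     """
--     c = Counter()
--     last_char = None
--     for base in seq:
--         if last_char == base:  # hp continue
--             c['hp'] += 1
--         else:
--             if c['hp'] > c['longest_hp']:
--                 c['longest_hp'] = c['hp']
--             c['hp'] = 1
--         if base in ['G', 'C']:
--             c['gc'] += 1
--         else:
--             if c['gc'] > c['longest_gc']: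
--                 c['longest_gc'] = c['gc']
--             c['gc'] = 0
--         last_char = base
--     if c['hp'] > c['longest_hp']:
--         c['longest_hp'] = c['hp']
--     if c['gc'] > c['longest_gc']:
--         c['longest_gc'] = c['gc']
--     # get max base:return max(c, key=c.get)
--     return c['longest_hp'], c['longest_gc']
-- ===== SOURCE B (Python) =====
-- def longest_hp_gc_len(seq) -> (int, int):
--     """Two-phase: run-length encode the sequence once, then take maxima over the runs."""
--     groups = []
--     for ch in seq:
--         if groups and groups[-1][0] == ch:
--             groups[-1] = (ch, groups[-1][1] + 1)
--         else:
--             groups.append((ch, 1))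
--     longest_hp = max((n for _, n in groups), default=0)
--     run = 0
--     gc_runs = []
--     for ch, n in groups:
--         if ch in ('G', 'C'):
--             run += n
--         else:
--             if run > 0:
--                 gc_runs.append(run)
--             run = 0
--     if run > 0:
--         gc_runs.append(run)
--     longest_gc = max(gc_runs, default=0)
--     return longest_hp, longest_gc
-- ===== Notes on version B (the rewrite author's own statement) =====
-- stated objective: alternative
-- what changed: A threads a Counter through a single character loop with flush-on-change bookkeeping; B first run-length-encodes the sequence, then takes the max run length for the homopolymer answer and merges consecutive G/C runs for the GC answer.
import Mathlib
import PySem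

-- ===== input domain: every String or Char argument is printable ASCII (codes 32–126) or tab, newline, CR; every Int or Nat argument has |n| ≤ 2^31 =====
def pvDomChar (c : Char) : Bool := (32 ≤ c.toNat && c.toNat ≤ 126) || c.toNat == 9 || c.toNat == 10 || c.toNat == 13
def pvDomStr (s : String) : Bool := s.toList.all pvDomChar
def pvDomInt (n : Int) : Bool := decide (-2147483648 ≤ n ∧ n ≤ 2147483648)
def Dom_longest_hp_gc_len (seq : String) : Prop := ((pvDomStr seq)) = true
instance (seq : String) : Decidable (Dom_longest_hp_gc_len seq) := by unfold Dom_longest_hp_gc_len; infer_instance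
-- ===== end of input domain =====

-- B replaces A's single-pass Counter bookkeeping by run-length encoding followed by maxima over the runs (alternative decomposition; a timing run measured it faster by a constant factor).

-- ===== PORT A =====
-- one iteration of A's for-loop over the Counter `c` and `last_char`
def stepA (st : PySem.Dict String Int × Option Char) (base : Char) : PySem.Dict String Int × Option Char :=
  let c := st.1
  let last := st.2
  let c :=
    if last == some base then
      c.insert "hp" (c.getD "hp" 0 + 1)
    else
      let c := if c.getD "hp" 0 > c.getD "longest_hp" 0 then c.insert "longest_hp" (c.getD "hp" 0) else c
      c.insert "hp" 1
  let c :=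
    if base == 'G' || base == 'C' then
      c.insert "gc" (c.getD "gc" 0 + 1)
    else
      let c := if c.getD "gc" 0 > c.getD "longest_gc" 0 then c.insert "longest_gc" (c.getD "gc" 0) else c
      c.insert "gc" 0
  (c, some base)

def longest_hp_gc_len (seq : String) : Int × Int :=
  let st := seq.toList.foldl stepA (PySem.Dict.empty, none)
  let c := st.1
  let c := if c.getD "hp" 0 > c.getD "longest_hp" 0 then c.insert "longest_hp" (c.getD "hp" 0) else c
  let c := if c.getD "gc" 0 > c.getD "longest_gc" 0 then c.insert "longest_gc" (c.getD "gc" 0) else c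
  (c.getD "longest_hp" 0, c.getD "longest_gc" 0)

-- ===== PORT B =====
-- phase 1 step: extend the run-length encoding `groups` by one character
def pushChar (groups : List (Char × Int)) (ch : Char) : List (Char × Int) :=
  match groups.getLast? with
  | some (c, n) => if c == ch then groups.dropLast ++ [(ch, n + 1)] else groups ++ [(ch, 1)]
  | none => groups ++ [(ch, 1)]

-- phase 2 step: merge consecutive G/C runs, flushing finished positive runs
def gcStep (st : Int × List Int) (p : Char × Int) : Int × List Int :=
  if p.1 == 'G' || p.1 == 'C' then (st.1 + p.2, st.2)
  else (0, if 0 < st.1 then st.2 ++ [st.1] else st.2)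

def longest_hp_gc_len_alt (seq : String) : Int × Int :=
  let groups := seq.toList.foldl pushChar []
  let longest_hp := (groups.map (·.2)).foldl max 0
  let st := groups.foldl gcStep (0, [])
  let gc_runs := if 0 < st.1 then st.2 ++ [st.1] else st.2
  let longest_gc := gc_runs.foldl max 0
  (longest_hp, longest_gc)

-- ===== PRECONDITION & SPEC =====
def Spec_longest_hp_gc_len (seq : String) (out : Int × Int) : Prop := out = longest_hp_gc_len_alt seq
instance (seq : String) (out : Int × Int) : Decidable (Spec_longest_hp_gc_len seq out) := by unfold Spec_longest_hp_gc_len; infer_instance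

-- ===== CLAIM (what is proved, stated in full; the proofs are below) =====
def Claim_equal_longest_hp_gc_len : Prop := ∀ (seq : String), Dom_longest_hp_gc_len seq → Spec_longest_hp_gc_len seq (longest_hp_gc_len seq)

-- ===== LEMMAS AND PROOFS =====

-- A's loop step, on the four Counter entries (hp, longest_hp, gc, longest_gc)
def stepT (q : Int × Int × Int × Int) (last : Option Char) (b : Char) : Int × Int × Int × Int :=
  let hp := if last == some b then q.1 + 1 else 1
  let lhp := if last == some b then q.2.1 else (if q.1 > q.2.1 then q.1 else q.2.1)
  let gc := if b == 'G' || b == 'C' then q.2.2.1 + 1 else 0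
  let lgc := if b == 'G' || b == 'C' then q.2.2.2 else (if q.2.2.1 > q.2.2.2 then q.2.2.1 else q.2.2.2)
  (hp, lhp, gc, lgc)

-- A's loop on the four Counter entries, epilogue folded in
def loopT : List Char → (Int × Int × Int × Int) → Option Char → Int × Int
  | [], q, _ => (if q.1 > q.2.1 then q.1 else q.2.1, if q.2.2.1 > q.2.2.2 then q.2.2.1 else q.2.2.2)
  | b :: t, q, last => loopT t (stepT q last b) (some b)

-- A's loop restricted to the homopolymer state
def loopHp : List Char → Int → Int → Option Char → Int
  | [], hp, lhp, _ => if hp > lhp then hp else lhp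
  | b :: t, hp, lhp, last =>
      if last == some b then loopHp t (hp + 1) lhp (some b)
      else loopHp t 1 (if hp > lhp then hp else lhp) (some b)

-- A's loop restricted to the GC state
def loopGc : List Char → Int → Int → Int
  | [], gc, lgc => if gc > lgc then gc else lgc
  | b :: t, gc, lgc =>
      if b == 'G' || b == 'C' then loopGc t (gc + 1) lgc
      else loopGc t 0 (if gc > lgc then gc else lgc)

-- canonical "best homopolymer run from state (last, current length n)"
def ahp : Option Char → Int → List Char → Int
  | _, n, [] => n
  | last, n, b :: t => if last == some b then ahp (some b) (n + 1) t else max n (ahp (some b) 1 t)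

-- canonical "best GC run from current run length"
def agc : Int → List Char → Int
  | run, [] => run
  | run, b :: t => if b == 'G' || b == 'C' then agc (run + 1) t else max run (agc 0 t)

-- run-length encoding continuation: current run (c, n), then the rest of the characters
def rleCont : Char → Int → List Char → List (Char × Int)
  | c, n, [] => [(c, n)]
  | c, n, b :: t => if b == c then rleCont c (n + 1) t else (c, n) :: rleCont b 1 t

-- group-level best GC run
def bgc : Int → List (Char × Int) → Int
  | run, [] => run
  | run, (ch, n) :: t => if ch == 'G' || ch == 'C' then bgc (run + n) t else max run (bgc 0 t)

theorem quad_stepA (d : PySem.Dict String Int) (last : Option Char) (b : Char) :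
    (((stepA (d, last) b).1.getD "hp" 0, (stepA (d, last) b).1.getD "longest_hp" 0,
      (stepA (d, last) b).1.getD "gc" 0, (stepA (d, last) b).1.getD "longest_gc" 0))
    = stepT (d.getD "hp" 0, d.getD "longest_hp" 0, d.getD "gc" 0, d.getD "longest_gc" 0) last b := by
  simp only [stepA, stepT]
  split_ifs <;> simp_all [PySem.Dict.getD_insert]

theorem dict_bridge (l : List Char) : ∀ (d : PySem.Dict String Int) (last : Option Char),
    (let st := l.foldl stepA (d, last)
     let c := st.1
     let c := if c.getD "hp" 0 > c.getD "longest_hp" 0 then c.insert "longest_hp" (c.getD "hp" 0) else c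
     let c := if c.getD "gc" 0 > c.getD "longest_gc" 0 then c.insert "longest_gc" (c.getD "gc" 0) else c
     ((c.getD "longest_hp" 0, c.getD "longest_gc" 0) : Int × Int))
    = loopT l (d.getD "hp" 0, d.getD "longest_hp" 0, d.getD "gc" 0, d.getD "longest_gc" 0) last := by
  induction l with
  | nil =>
      intro d last
      simp only [List.foldl_nil, loopT]
      split_ifs <;> simp_all [PySem.Dict.getD_insert]
  | cons b t ih =>
      intro d last
      simp only [List.foldl_cons, loopT]
      have hpair : stepA (d, last) b = ((stepA (d, last) b).1, some b) := rfl
      rw [hpair, ih ((stepA (d, last) b).1) (some b), ← quad_stepA d last b]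

theorem loopT_split (l : List Char) : ∀ (q : Int × Int × Int × Int) (last : Option Char),
    loopT l q last = (loopHp l q.1 q.2.1 last, loopGc l q.2.2.1 q.2.2.2) := by
  induction l with
  | nil => intro q last; rfl
  | cons b t ih =>
      intro q last
      simp only [loopT, loopHp, loopGc, ih, stepT]
      by_cases h1 : last == some b <;> by_cases h2 : b == 'G' || b == 'C' <;>
        simp [h1, h2]

theorem foldl_pushChar_concat (l : List Char) : ∀ (g : List (Char × Int)) (c : Char) (n : Int),
    List.foldl pushChar (g ++ [(c, n)]) l = g ++ rleCont c n l := by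
  induction l with
  | nil => intro g c n; simp [rleCont]
  | cons b t ih =>
      intro g c n
      simp only [List.foldl_cons, pushChar, List.getLast?_concat, List.dropLast_concat, rleCont]
      by_cases hbc : b = c
      · subst hbc
        simp only [beq_self_eq_true, if_true, ih g b (n + 1)]
      · have h1 : (c == b) = false := by simp [Ne.symm hbc]
        have h2 : (b == c) = false := by simp [hbc]
        simp only [h1, h2, Bool.false_eq_true, if_false]
        rw [ih (g ++ [(c, n)]) b 1]
        simp

theorem loopHp_eq (l : List Char) : ∀ (n lhp : Int) (last : Option Char),
    loopHp l n lhp last = max lhp (ahp last n l) := by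
  induction l with
  | nil => intro n lhp last; simp only [loopHp, ahp]; omega
  | cons b t ih =>
      intro n lhp last
      simp only [loopHp, ahp]
      by_cases h : last == some b
      · simp [h, ih]
      · simp only [h, Bool.false_eq_true, if_false, ih]
        omega

theorem foldl_max_rle (l : List Char) : ∀ (c : Char) (n a : Int),
    ((rleCont c n l).map (·.2)).foldl max a = max a (ahp (some c) n l) := by
  induction l with
  | nil => intro c n a; simp [rleCont, ahp]
  | cons b t ih =>
      intro c n a
      simp only [rleCont, ahp]
      by_cases hbc : b = c
      · subst hbc
        simp only [beq_self_eq_true, if_true, ih]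
      · have h1 : (b == c) = false := by simp [hbc]
        have h2 : (some c == some b) = false := by simp [Ne.symm hbc]
        simp only [h1, h2, Bool.false_eq_true, if_false, List.map_cons, List.foldl_cons, ih]
        omega

theorem loopGc_eq (l : List Char) : ∀ (run lgc : Int),
    loopGc l run lgc = max lgc (agc run l) := by
  induction l with
  | nil => intro run lgc; simp only [loopGc, agc]; omega
  | cons b t ih =>
      intro run lgc
      simp only [loopGc, agc]
      by_cases h : b == 'G' || b == 'C'
      · simp [h, ih]
      · simp only [h, Bool.false_eq_true, if_false, ih]
        omega

theorem agc_ge (l : List Char) : ∀ (run : Int), run ≤ agc run l := by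
  induction l with
  | nil => intro run; simp [agc]
  | cons b t ih =>
      intro run
      simp only [agc]
      by_cases h : b == 'G' || b == 'C'
      · simp only [h, if_true]
        have := ih (run + 1); omega
      · simp only [h, Bool.false_eq_true, if_false]
        omega

theorem rleCont_pos (l : List Char) : ∀ (c : Char) (n : Int), 1 ≤ n →
    ∀ p ∈ rleCont c n l, (1 : Int) ≤ p.2 := by
  induction l with
  | nil => intro c n hn p hp; simp only [rleCont, List.mem_singleton] at hp; subst hp; exact hn
  | cons b t ih =>
      intro c n hn p hp
      simp only [rleCont] at hp
      by_cases h : b == c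
      · rw [if_pos h] at hp
        exact ih c (n + 1) (by omega) p hp
      · rw [if_neg (by simp [h])] at hp
        rcases List.mem_cons.mp hp with h1 | h2
        · subst h1; exact hn
        · exact ih b 1 le_rfl p h2

theorem bgc_rle (l : List Char) : ∀ (c : Char) (n run : Int),
    bgc run (rleCont c n l) =
      if c == 'G' || c == 'C' then agc (run + n) l else max run (agc 0 l) := by
  induction l with
  | nil => intro c n run; simp [rleCont, bgc, agc]
  | cons b t ih =>
      intro c n run
      simp only [rleCont]
      by_cases hbc : b = c
      · subst hbc
        rw [if_pos (beq_self_eq_true b), ih b (n + 1) run]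
        simp only [agc]
        by_cases hg : b == 'G' || b == 'C'
        · simp only [hg, if_true]
          ring_nf
        · simp only [hg, Bool.false_eq_true, if_false]
          have h0 : max 0 (agc 0 t) = agc 0 t := by
            have := agc_ge t 0; omega
          rw [h0]
      · rw [if_neg (by simp [hbc])]
        simp only [bgc, ih b 1, agc]

theorem foldl_max_nonneg (l : List Int) : ∀ (a : Int), 0 ≤ a → 0 ≤ l.foldl max a := by
  induction l with
  | nil => intro a ha; simpa using ha
  | cons x t ih => intro a ha; exact ih _ (by omega)

theorem gc_phase (gl : List (Char × Int)) : ∀ (run : Int) (acc : List Int),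
    0 ≤ run → (∀ p ∈ gl, (0 : Int) ≤ p.2) →
    (let st := gl.foldl gcStep (run, acc)
     (if 0 < st.1 then st.2 ++ [st.1] else st.2).foldl max 0)
      = max ((acc.foldl max 0)) (max 0 (bgc run gl)) := by
  induction gl with
  | nil =>
      intro run acc hrun _
      simp only [List.foldl_nil, bgc]
      by_cases h : 0 < run
      · rw [if_pos h]
        simp only [List.foldl_append, List.foldl_cons, List.foldl_nil]
        omega
      · rw [if_neg h]
        have := foldl_max_nonneg acc 0 le_rfl
        omega
  | cons p t ih =>
      intro run acc hrun hpos
      obtain ⟨ch, n⟩ := p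
      have hn : (0 : Int) ≤ n := hpos (ch, n) (by simp)
      have hpos' : ∀ p ∈ t, (0 : Int) ≤ p.2 := fun p hp => hpos p (List.mem_cons_of_mem _ hp)
      simp only [List.foldl_cons, gcStep, bgc]
      by_cases hg : ch == 'G' || ch == 'C'
      · simp only [hg, if_true]
        exact ih (run + n) acc (by omega) hpos'
      · simp only [hg, Bool.false_eq_true, if_false]
        by_cases h0 : 0 < run
        · simp only [if_pos h0]
          rw [ih 0 (acc ++ [run]) le_rfl hpos']
          simp only [List.foldl_append, List.foldl_cons, List.foldl_nil]
          omega
        · simp only [if_neg h0]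
          rw [ih 0 acc le_rfl hpos']
          omega

-- ===== VERDICT (by name: the statement is the Claim_ definition above) =====
theorem longest_hp_gc_len_spec : Claim_equal_longest_hp_gc_len := by
  intro seq _
  unfold Spec_longest_hp_gc_len longest_hp_gc_len longest_hp_gc_len_alt
  rw [dict_bridge, loopT_split]
  simp only [PySem.Dict.getD_empty]
  cases hl : seq.toList with
  | nil => simp [loopHp, loopGc]
  | cons b t =>
      have hrle : List.foldl pushChar [] (b :: t) = rleCont b 1 t := by
        have : pushChar [] b = [] ++ [(b, (1 : Int))] := rfl
        rw [List.foldl_cons, this, foldl_pushChar_concat t [] b 1, List.nil_append]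
      rw [hrle, Prod.mk.injEq]
      constructor
      · -- hp component
        simp only [loopHp]
        rw [show ((none : Option Char) == some b) = false from rfl]
        simp only [Bool.false_eq_true, if_false]
        rw [loopHp_eq, foldl_max_rle]
        norm_num
      · -- gc component
        rw [loopGc_eq,
          gc_phase (rleCont b 1 t) 0 [] le_rfl
            (fun p hp => le_of_lt (lt_of_lt_of_le zero_lt_one (rleCont_pos t b 1 le_rfl p hp))),
          bgc_rle]
        simp only [List.foldl_nil, agc]
        by_cases hg : b == 'G' || b == 'C'
        · simp [hg]
        · simp only [hg, Bool.false_eq_true, if_false]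
          have := agc_ge t 0
          omega
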